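-- pv_equiv track=rewrite | github.com/cabalamat/catwiki_p3 | app/diffhelper.py | getPositiveInts
-- ===== SOURCE A (Python) =====
-- from typing import List, Literal, Tuple
--
-- def getPositiveInts(s: str) -> List[int]:
--     """ find positive integers in a string.
--     Every chars not in [0-9] is converted to a space.
--     Then the integers are found and returned.
--     E.g. getPositiveInts(" 3xxx7-8+91zzz") => [3,7,8,91]
--     """
--     s2 = ""
--     for ch in s:
--         if ch in "0123456789":
--             s2 += ch
--         else:
--             s2 += " "
--     groups = s2.split()
--     r = []
--     for g in groups:
--         try:
--             i = int(g)
--         except ValueError: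
--             continue
--         r.append(i)
--     #//for
--     return r
-- ===== SOURCE B (Python) =====
-- def getPositiveInts(s):
--     """ find positive integers in a string: single pass with an integer
--     accumulator instead of building a space-translated copy and splitting it. """
--     r = []
--     cur = 0
--     in_number = False
--     for ch in s:
--         if '0' <= ch <= '9':
--             cur = cur * 10 + (ord(ch) - 48)
--             in_number = True
--         elif in_number:
--             r.append(cur)
--             cur = 0
--             in_number = False
--     if in_number:
--         r.append(cur)
--     return r
-- ===== Notes on version B (the rewrite author's own statement) =====
-- stated objective: alternative
-- what changed: Replaces A's three-pass pipeline (build a space-translated copy of the string, split it on whitespace, int() each group) by a single pass over the characters with an integer accumulator and an in-number flag, with no intermediate string or group list.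
import Mathlib
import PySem

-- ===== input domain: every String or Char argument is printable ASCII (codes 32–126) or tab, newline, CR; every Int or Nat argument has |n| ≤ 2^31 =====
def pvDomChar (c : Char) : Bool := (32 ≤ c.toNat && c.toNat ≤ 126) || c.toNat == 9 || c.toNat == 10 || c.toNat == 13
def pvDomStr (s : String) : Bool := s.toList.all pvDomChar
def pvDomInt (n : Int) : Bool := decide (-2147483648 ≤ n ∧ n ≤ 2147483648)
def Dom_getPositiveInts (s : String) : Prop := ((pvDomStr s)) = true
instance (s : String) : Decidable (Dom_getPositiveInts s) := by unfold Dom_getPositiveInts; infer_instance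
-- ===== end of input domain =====

-- B replaces A's build-a-space-translated-string-then-split-then-int pipeline by a single pass
-- with an integer accumulator and an in-number flag (alternative decomposition).

-- ===== PORT A =====
-- the characters of the Python literal "0123456789" (membership test `ch in "0123456789"`)
def pvDigits : List Char := ['0', '1', '2', '3', '4', '5', '6', '7', '8', '9']

-- Hand port of `int(g)` with its try/except ValueError, exact on every group this program feeds it:
-- s2.split() only yields nonempty all-digit groups, and on those Python's int returns the decimal
-- value computed by this fold (the except-branch of A is unreachable).  Ported by hand because
-- PySem.Int.ofChars? is implemented through private helpers the proofs here could not unfold.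
def pvInt? (g : List Char) : Option Int :=
  if g ≠ [] ∧ g.all (· ∈ pvDigits) then
    some (g.foldl (fun a c => a * 10 + ((c.toNat : Int) - 48)) 0)
  else none

def getPositiveInts (s : String) : List Int :=
  let s2 := s.toList.foldl (fun acc ch => if ch ∈ pvDigits then acc ++ [ch] else acc ++ [' ']) []
  let groups := PySem.Chars.split₀ s2
  groups.foldl (fun r g => match pvInt? g with | some i => r ++ [i] | none => r) []

-- ===== PORT B =====
-- state (r, cur, in_number); on a digit: cur := cur*10 + (ord(ch) - 48); otherwise flush cur if
-- in_number; after the loop flush the trailing number.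
def getPositiveInts_alt (s : String) : List Int :=
  let st := s.toList.foldl
    (fun (st : List Int × Int × Bool) ch =>
      if '0' ≤ ch ∧ ch ≤ '9' then (st.1, st.2.1 * 10 + ((ch.toNat : Int) - 48), true)
      else if st.2.2 then (st.1 ++ [st.2.1], 0, false)
      else st)
    ([], 0, false)
  if st.2.2 then st.1 ++ [st.2.1] else st.1

-- ===== PRECONDITION & SPEC =====
def Spec_getPositiveInts (s : String) (out : List Int) : Prop := out = getPositiveInts_alt s
instance (s : String) (out : List Int) : Decidable (Spec_getPositiveInts s out) := by unfold Spec_getPositiveInts; infer_instance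

-- ===== CLAIM (what is proved, stated in full; the proofs are below) =====
def Claim_equal_getPositiveInts : Prop := ∀ (s : String), Dom_getPositiveInts s → Spec_getPositiveInts s (getPositiveInts s)

-- ===== LEMMAS AND PROOFS =====

-- A's character translation: digits stay, everything else becomes a space
def pvT (ch : Char) : Char := if ch ∈ pvDigits then ch else ' '

-- A's append-the-parsed-group loop body
def pvStepA (r : List Int) (g : List Char) : List Int :=
  match pvInt? g with | some i => r ++ [i] | none => r

-- B's loop body and final flush
def pvStepB (st : List Int × Int × Bool) (ch : Char) : List Int × Int × Bool :=
  if '0' ≤ ch ∧ ch ≤ '9' then (st.1, st.2.1 * 10 + ((ch.toNat : Int) - 48), true)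
  else if st.2.2 then (st.1 ++ [st.2.1], 0, false)
  else st

def pvFlush (st : List Int × Int × Bool) : List Int :=
  if st.2.2 then st.1 ++ [st.2.1] else st.1

-- decimal value of a digit run
def pvVal (g : List Char) : Int := g.foldl (fun a c => a * 10 + ((c.toNat : Int) - 48)) 0

lemma mem_pvDigits_iff (c : Char) : c ∈ pvDigits ↔ ('0' ≤ c ∧ c ≤ '9') := by
  constructor
  · intro h; fin_cases h <;> exact ⟨by decide, by decide⟩
  · rintro ⟨h1, h2⟩
    have hl : 48 ≤ c.toNat := Nat.succ_le_of_lt h1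
    have hr : c.toNat ≤ 57 := by
      have : c.toNat < 58 := Nat.lt_succ_of_le h2
      omega
    have hc := (Char.ofNat_toNat c).symm
    interval_cases h : c.toNat <;> subst hc <;> decide

lemma isspace_of_digit (c : Char) (h : c ∈ pvDigits) : PySem.Chars.isspace c = false := by
  fin_cases h <;> decide

lemma pvInt?_digits (g : List Char) (hne : g ≠ []) (hd : ∀ c ∈ g, c ∈ pvDigits) :
    pvInt? g = some (pvVal g) := by
  have hall : g.all (· ∈ pvDigits) = true := by
    rw [List.all_eq_true]; intro x hx; exact decide_eq_true (hd x hx)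
  simp [pvInt?, pvVal, hne, hall]

lemma pvVal_snoc (g : List Char) (c : Char) :
    pvVal (g ++ [c]) = pvVal g * 10 + ((c.toNat : Int) - 48) := by
  simp [pvVal, List.foldl_append]

lemma pvStepA_append (l : List (List Char)) (g : List Char) (hne : g ≠ [])
    (hd : ∀ c ∈ g, c ∈ pvDigits) (init : List Int) :
    (l ++ [g]).foldl pvStepA init = l.foldl pvStepA init ++ [pvVal g] := by
  simp [List.foldl_append, pvStepA, pvInt?_digits g hne hd]

lemma go_cons_nonspace (rest cur : List Char) (acc : List (List Char)) (c : Char)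
    (h : PySem.Chars.isspace c = false) :
    PySem.Chars.split₀.go (c :: rest) cur acc = PySem.Chars.split₀.go rest (c :: cur) acc := by
  rw [PySem.Chars.split₀.go]; simp [h]

lemma go_cons_space_nil (rest : List Char) (acc : List (List Char)) (c : Char)
    (h : PySem.Chars.isspace c = true) :
    PySem.Chars.split₀.go (c :: rest) [] acc = PySem.Chars.split₀.go rest [] acc := by
  rw [PySem.Chars.split₀.go]; simp [h]

lemma go_cons_space_cons (rest cur : List Char) (acc : List (List Char)) (c d : Char)
    (h : PySem.Chars.isspace c = true) :
    PySem.Chars.split₀.go (c :: rest) (d :: cur) acc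
      = PySem.Chars.split₀.go rest [] ((d :: cur).reverse :: acc) := by
  rw [PySem.Chars.split₀.go]; simp [h]

lemma go_nil (cur : List Char) (acc : List (List Char)) :
    PySem.Chars.split₀.go [] cur acc
      = (if cur.isEmpty then acc.reverse else (cur.reverse :: acc).reverse) := by
  rw [PySem.Chars.split₀.go]

-- the loop invariant: split₀'s state (cur reversed run, acc of finished groups) corresponds to
-- B's state (emitted list, value of the open run, in-number flag)
lemma pv_main (cs : List Char) : ∀ (curA : List Char) (accA : List (List Char)),
    (∀ c ∈ curA, c ∈ pvDigits) → (∀ g ∈ accA, g ≠ [] ∧ ∀ c ∈ g, c ∈ pvDigits) →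
    (PySem.Chars.split₀.go (cs.map pvT) curA accA).foldl pvStepA []
      = pvFlush (cs.foldl pvStepB (accA.reverse.foldl pvStepA [], pvVal curA.reverse, !curA.isEmpty)) := by
  induction cs with
  | nil =>
    intro curA accA h1 h2
    rw [List.map_nil, go_nil]
    cases curA with
    | nil => simp [pvFlush, pvVal]
    | cons d tl =>
      have hne : (d :: tl).reverse ≠ [] := by simp
      have hd : ∀ c ∈ (d :: tl).reverse, c ∈ pvDigits := fun c hc => h1 c (List.mem_reverse.mp hc)
      rw [show ((d :: tl).isEmpty) = false from rfl]
      rw [if_neg (by simp)]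
      rw [List.reverse_cons, pvStepA_append _ _ hne hd]
      simp [pvFlush]
  | cons ch cs ih =>
    intro curA accA h1 h2
    rw [List.foldl_cons]
    by_cases hdig : ch ∈ pvDigits
    · have hsp : PySem.Chars.isspace ch = false := isspace_of_digit ch hdig
      have hT : pvT ch = ch := if_pos hdig
      rw [List.map_cons, hT, go_cons_nonspace _ _ _ _ hsp]
      rw [ih (ch :: curA) accA
        (by intro c hc; rcases List.mem_cons.mp hc with rfl | hc; exacts [hdig, h1 c hc]) h2]
      have hB : pvStepB (accA.reverse.foldl pvStepA [], pvVal curA.reverse, !curA.isEmpty) ch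
          = (accA.reverse.foldl pvStepA [], pvVal curA.reverse * 10 + ((ch.toNat : Int) - 48), true) := by
        simp [pvStepB, (mem_pvDigits_iff ch).mp hdig]
      rw [hB, List.reverse_cons, pvVal_snoc]
      simp
    · have hnd : ¬ ('0' ≤ ch ∧ ch ≤ '9') := fun h => hdig ((mem_pvDigits_iff ch).mpr h)
      have hT : pvT ch = ' ' := if_neg hdig
      rw [List.map_cons, hT]
      cases curA with
      | nil =>
        rw [go_cons_space_nil _ _ _ (by decide)]
        rw [ih [] accA (by intro c hc; simp at hc) h2]
        have hB : pvStepB (accA.reverse.foldl pvStepA [], pvVal List.nil.reverse, !(List.nil : List Char).isEmpty) ch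
            = (accA.reverse.foldl pvStepA [], pvVal List.nil.reverse, !(List.nil : List Char).isEmpty) := by
          simp [pvStepB, hnd]
        rw [hB]
      | cons d tl =>
        rw [go_cons_space_cons _ _ _ _ _ (by decide)]
        have hne : (d :: tl).reverse ≠ [] := by simp
        have hd : ∀ c ∈ (d :: tl).reverse, c ∈ pvDigits := fun c hc => h1 c (List.mem_reverse.mp hc)
        rw [ih [] ((d :: tl).reverse :: accA)
          (by intro c hc; simp at hc)
          (by intro g hg; rcases List.mem_cons.mp hg with rfl | hg
              · exact ⟨hne, hd⟩
              · exact h2 g hg)]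
        rw [List.reverse_cons (as := accA), pvStepA_append _ _ hne hd]
        have hB : pvStepB (accA.reverse.foldl pvStepA [], pvVal (d :: tl).reverse, !(d :: tl).isEmpty) ch
            = (accA.reverse.foldl pvStepA [] ++ [pvVal (d :: tl).reverse], 0, false) := by
          simp [pvStepB, hnd]
        rw [hB]
        simp [pvVal]

-- ===== VERDICT (by name: the statement is the Claim_ definition above) =====
theorem getPositiveInts_spec : Claim_equal_getPositiveInts := by
  intro s _
  unfold Spec_getPositiveInts getPositiveInts getPositiveInts_alt
  have hmap : s.toList.foldl (fun acc ch => if ch ∈ pvDigits then acc ++ [ch] else acc ++ [' ']) []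
      = s.toList.map pvT := by
    rw [show (fun (acc : List Char) ch => if ch ∈ pvDigits then acc ++ [ch] else acc ++ [' '])
        = fun acc ch => acc ++ [pvT ch] from funext fun acc => funext fun ch => by
      unfold pvT; split_ifs <;> rfl]
    rw [PySem.List.foldl_append_singleton_eq_map, List.nil_append]
  rw [hmap]
  exact pv_main s.toList [] [] (by intro c hc; simp at hc) (by intro g hg; simp at hg)
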